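-- pv_equiv track=rewrite | github.com/Bhanjo/algorithm | programmers/lv2/메뉴리뉴얼.py | solution
-- ===== SOURCE A (Python) =====
-- from itertools import combinations
-- from itertools import combinations
-- from itertools import combinations
--
-- def solution(orders, course):
--     answer = []
--     orderDict = {}
--     # 모든 조합 생성
--     for order in orders:
--         for food in range(len(order)):
--             combi = list(combinations(order, food+1))
--             for i in combi:
--                 i = list(i)
--                 i.sort()
--                 i = ''.join(i)
--                 if i not in orderDict:
--                     orderDict[i] = 1
--                 else:
--                     orderDict[i] += 1
--
--     # 코스 수에 따른 조합 판단
--     for num in course: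
--         orderTuple = orderDict.items()
--         courseItem = []
--         maxOrder = 0
--         for od in orderTuple:
--             # 코스 수 일치 and 주문 수량 >= 2
--             if len(od[0]) == num and od[1] >= 2:
--                 appendOd = od
--                 if len(courseItem) == 0:
--                     courseItem.append(appendOd)
--                     maxOrder = appendOd[1]
--                 elif appendOd[1] > maxOrder:
--                     courseItem = [appendOd]
--                     maxOrder = appendOd[1]
--                 elif appendOd[1] == maxOrder:
--                     courseItem.append(appendOd)
--
--         for i in courseItem:
--             answer.append(i[0])
--     answer.sort()
--     return answer
-- ===== SOURCE B (Python) =====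
-- from itertools import combinations
--
-- def solution(orders, course):
--     answer = []
--     picks = {}
--     longest = max(map(len, orders), default=0)
--     for num in course:
--         if num not in picks:
--             picks[num] = _course_picks(orders, longest, num)
--         answer.extend(picks[num])
--     answer.sort()
--     return answer
--
-- def _course_picks(orders, longest, num):
--     if num < 1 or longest < num:
--         return []
--     cnt = {}
--     for order in orders:
--         if num <= len(order):
--             for c in combinations(order, num):
--                 key = ''.join(sorted(c))
--                 cnt[key] = cnt.get(key, 0) + 1
--     best = max(cnt.values(), default=0)
--     if best >= 2:
--         return [k for k, v in cnt.items() if v == best]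
--     return []
-- ===== Notes on version B (the rewrite author's own statement) =====
-- stated objective: faster
-- what changed: Instead of counting combinations of every length up front and rescanning the whole dictionary with an argmax-collect loop for every course entry, B computes the answer per distinct course size only (memoized in a dict, sizes outside [1, longest order] rejected immediately), counting only that size's combinations and picking the keys at the maximum count with max() and a comprehension.
import Mathlib
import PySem

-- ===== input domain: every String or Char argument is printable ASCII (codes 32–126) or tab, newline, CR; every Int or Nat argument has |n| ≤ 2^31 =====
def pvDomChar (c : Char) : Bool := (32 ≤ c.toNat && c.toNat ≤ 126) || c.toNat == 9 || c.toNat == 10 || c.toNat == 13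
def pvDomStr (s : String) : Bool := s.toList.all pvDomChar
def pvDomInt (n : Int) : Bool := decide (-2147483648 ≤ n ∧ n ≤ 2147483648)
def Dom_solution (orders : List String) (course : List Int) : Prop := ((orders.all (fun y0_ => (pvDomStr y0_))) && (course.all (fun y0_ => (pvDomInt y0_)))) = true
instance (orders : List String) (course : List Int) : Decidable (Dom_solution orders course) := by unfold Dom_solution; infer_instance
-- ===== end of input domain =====

-- B computes the result once per distinct course size (memoized; sizes outside [1, longest order]
-- rejected immediately), counting only that size's combinations and taking the keys at max count,
-- instead of A's counting of ALL combination sizes up front plus a full rescan of that dictionary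
-- for every course entry (objective: faster; measured faster in a timing run).


-- ===== PORT A =====
-- 'if i not in orderDict: orderDict[i] = 1 else: orderDict[i] += 1'
def dictAddA (d : PySem.Dict String Int) (i : String) : PySem.Dict String Int :=
  if d.contains i = false then d.insert i 1 else d.insert i (d.getD i 0 + 1)

-- the nested combination-generating loops; (food + 1).toNat is exact: food ∈ range(len(order)) is ≥ 0
def buildDictA (orders : List String) : PySem.Dict String Int :=
  orders.foldl (fun d order =>
    (PySem.List.pyRange 0 (PySem.Str.len order)).foldl (fun d food =>
      (PySem.List.combinations order.toList (food + 1).toNat).foldl (fun d c =>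
        dictAddA d (String.ofList (PySem.List.sorted c (fun x => x) false))) d) d)
    PySem.Dict.empty

-- the body of 'for od in orderTuple', state = (courseItem, maxOrder)
def courseStepA (num : Int) (s : List (String × Int) × Int) (od : String × Int) :
    List (String × Int) × Int :=
  if PySem.Str.len od.1 = num ∧ 2 ≤ od.2 then
    if s.1.length = 0 then (s.1 ++ [od], od.2)
    else if od.2 > s.2 then ([od], od.2)
    else if od.2 = s.2 then (s.1 ++ [od], s.2)
    else s
  else s

def solution (orders : List String) (course : List Int) : List String :=
  let orderDict := buildDictA orders
  let answer := course.foldl (fun answer num =>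
    let courseItem := (orderDict.items.foldl (courseStepA num) ([], 0)).1
    answer ++ courseItem.map (fun i => i.1)) []
  PySem.List.sorted answer (fun x => x) false

-- ===== PORT B =====
-- counter of the sorted course-sized combinations only: 'cnt[key] = cnt.get(key, 0) + 1'
def countCombosB (orders : List String) (num : Int) : PySem.Dict String Int :=
  orders.foldl (fun d order =>
    if num ≤ PySem.Str.len order then
      (PySem.List.combinations order.toList num.toNat).foldl (fun d c =>
        d.insert (String.ofList (PySem.List.sorted c (fun x => x) false))
          (d.getD (String.ofList (PySem.List.sorted c (fun x => x) false)) 0 + 1)) d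
    else d)
    PySem.Dict.empty

-- B's helper _course_picks: what one course entry extends answer with
def pickB (orders : List String) (longest : Int) (num : Int) : List String :=
  if num < 1 ∨ longest < num then []
  else
    let cnt := countCombosB orders num
    let best := PySem.List.maxD cnt.values (fun v => v) 0
    if 2 ≤ best then (cnt.items.filter (fun p => p.2 == best)).map (fun p => p.1)
    else []

-- one step of B's main loop; state = (answer, picks); 'if num not in picks: picks[num] = _course_picks(...)'
def stepB (orders : List String) (longest : Int) (st : List String × PySem.Dict Int (List String))
    (num : Int) : List String × PySem.Dict Int (List String) :=
  let picks := if st.2.contains num = false then st.2.insert num (pickB orders longest num) else st.2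
  (st.1 ++ picks.getD num [], picks)

-- 'longest = max(map(len, orders), default=0)'
def solution_alt (orders : List String) (course : List Int) : List String :=
  let longest := PySem.List.maxD (orders.map (fun o => PySem.Str.len o)) (fun v => v) 0
  let st := course.foldl (stepB orders longest) ([], PySem.Dict.empty)
  PySem.List.sorted st.1 (fun x => x) false

-- ===== PRECONDITION & SPEC =====
def Spec_solution (orders : List String) (course : List Int) (out : List String) : Prop := out = solution_alt orders course
instance (orders : List String) (course : List Int) (out : List String) : Decidable (Spec_solution orders course out) := by unfold Spec_solution; infer_instance

-- ===== CLAIM (what is proved, stated in full; the proofs are below) =====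
def Claim_equal_solution : Prop := ∀ (orders : List String) (course : List Int), Dom_solution orders course → Spec_solution orders course (solution orders course)

-- ===== LEMMAS AND PROOFS =====

-- proof-side view of the multisets of keys the two programs count
def joinS (c : List Char) : String := String.ofList (PySem.List.sorted c (fun x => x) false)

def grpA (o : String) : List String :=
  (List.range o.toList.length).flatMap (fun f => (PySem.List.combinations o.toList (f + 1)).map joinS)

def LA (orders : List String) : List String := orders.flatMap grpA

def LB (orders : List String) (n : Nat) : List String :=
  orders.flatMap (fun o => (PySem.List.combinations o.toList n).map joinS)

theorem dictAddA_eq (d : PySem.Dict String Int) (i : String) :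
    dictAddA d i = d.insert i (d.getD i 0 + 1) := by
  unfold dictAddA
  by_cases h : d.contains i = false
  · simp [h, PySem.Dict.getD_of_not_contains d 0 h]
  · simp [h]

theorem buildDictA_eq (orders : List String) :
    buildDictA orders = PySem.Dict.counter (LA orders) := by
  unfold buildDictA LA grpA
  rw [← PySem.Dict.foldl_insert_getD_add_one_eq_counter, List.foldl_flatMap]
  simp [PySem.Str.len_eq, PySem.List.pyRange_zero_natCast, List.foldl_flatMap,
    List.foldl_map, joinS, dictAddA_eq]

theorem countCombosB_eq (orders : List String) (num : Int) :
    countCombosB orders num = PySem.Dict.counter (LB orders num.toNat) := by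
  unfold countCombosB LB
  rw [← PySem.Dict.foldl_insert_getD_add_one_eq_counter, List.foldl_flatMap]
  congr 1
  funext d o
  by_cases h : num ≤ PySem.Str.len o
  · rw [if_pos h]
    simp [List.foldl_map, joinS]
  · rw [if_neg h]
    have hlt : o.toList.length < num.toNat := by
      rw [PySem.Str.len_eq] at h
      omega
    rw [PySem.List.combinations_eq_nil_of_length_lt _ hlt]
    simp

theorem len_joinS (c : List Char) : (joinS c).toList.length = c.length := by
  simp [joinS, String.toList_ofList, PySem.List.length_sorted]

theorem mem_grpA_iff {o : String} {k : String} :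
    k ∈ grpA o ↔ ∃ f < o.toList.length, ∃ c ∈ PySem.List.combinations o.toList (f + 1), k = joinS c := by
  simp [grpA, List.mem_flatMap, List.mem_map, List.mem_range, eq_comm]

theorem one_le_len_of_mem_LA {orders : List String} {k : String}
    (h : k ∈ LA orders) : 1 ≤ k.toList.length := by
  simp only [LA, List.mem_flatMap] at h
  obtain ⟨o, _, ho⟩ := h
  obtain ⟨f, _, c, hc, rfl⟩ := mem_grpA_iff.mp ho
  rw [len_joinS]
  have := PySem.List.length_of_mem_combinations hc
  omega

theorem mem_LB_iff {orders : List String} {n : Nat} {k : String} :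
    k ∈ LB orders n ↔ ∃ o ∈ orders, ∃ c ∈ PySem.List.combinations o.toList n, k = joinS c := by
  simp [LB, List.mem_flatMap, List.mem_map, eq_comm]

theorem mem_LB_len {orders : List String} {n : Nat} {k : String}
    (h : k ∈ LB orders n) : k.toList.length = n := by
  obtain ⟨o, _, c, hc, rfl⟩ := mem_LB_iff.mp h
  rw [len_joinS]
  exact PySem.List.length_of_mem_combinations hc

theorem mem_LB_mem_LA {orders : List String} {n : Nat} {k : String}
    (hn : 1 ≤ n) (h : k ∈ LB orders n) : k ∈ LA orders := by
  obtain ⟨o, ho, c, hc, rfl⟩ := mem_LB_iff.mp h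
  have hsub := (PySem.List.mem_combinations_iff _ _ _).mp hc
  have hle : n ≤ o.toList.length := hsub.2 ▸ hsub.1.length_le
  simp only [LA, List.mem_flatMap]
  refine ⟨o, ho, mem_grpA_iff.mpr ⟨n - 1, by omega, c, ?_, rfl⟩⟩
  have : n - 1 + 1 = n := by omega
  rw [this]
  exact hc

theorem mem_LA_len_mem_LB {orders : List String} {n : Nat} {k : String}
    (h : k ∈ LA orders) (hl : k.toList.length = n) : k ∈ LB orders n := by
  simp only [LA, List.mem_flatMap] at h
  obtain ⟨o, ho, hgo⟩ := h
  obtain ⟨f, _, c, hc, rfl⟩ := mem_grpA_iff.mp hgo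
  have hlen : c.length = f + 1 := PySem.List.length_of_mem_combinations hc
  have hfn : f + 1 = n := by rw [len_joinS] at hl; omega
  exact mem_LB_iff.mpr ⟨o, ho, c, by rw [← hfn]; exact hc, rfl⟩

theorem sum_range_single (L j : Nat) (g : Nat → Nat) (h0 : ∀ i < L, i ≠ j → g i = 0) :
    ((List.range L).map g).sum = if j < L then g j else 0 := by
  induction L with
  | zero => simp
  | succ L ih =>
    rw [List.range_succ, List.map_append, List.sum_append,
      ih (fun i hi hij => h0 i (by omega) hij)]
    by_cases hje : j = L
    · subst hje
      simp
    · have hgL : g L = 0 := h0 L (by omega) (fun h => hje h.symm)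
      by_cases hj : j < L
      · simp [hj, hgL, Nat.lt_succ_of_lt hj]
      · have hns : ¬ j < L + 1 := by omega
        simp [hj, hgL, hns]

theorem count_grpA {o : String} {n : Nat} {k : String}
    (hn : 1 ≤ n) (hl : k.toList.length = n) :
    List.count k (grpA o) = List.count k ((PySem.List.combinations o.toList n).map joinS) := by
  unfold grpA
  rw [List.count_flatMap]
  have h0 : ∀ i < o.toList.length, i ≠ n - 1 →
      (List.count k ∘ fun f => (PySem.List.combinations o.toList (f + 1)).map joinS) i = 0 := by
    intro i _ hi
    simp only [Function.comp_apply]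
    rw [List.count_eq_zero]
    intro hmem
    obtain ⟨c, hc, hck⟩ := List.mem_map.mp hmem
    have := PySem.List.length_of_mem_combinations hc
    have : k.toList.length = i + 1 := by rw [← hck, len_joinS, this]
    omega
  rw [sum_range_single _ (n - 1) _ h0]
  by_cases hL : n - 1 < o.toList.length
  · rw [if_pos hL]
    simp only [Function.comp_apply]
    have : n - 1 + 1 = n := by omega
    rw [this]
  · have hlt : o.toList.length < n := by omega
    rw [PySem.List.combinations_eq_nil_of_length_lt _ hlt, if_neg hL]
    simp

theorem count_LA_eq_count_LB {orders : List String} {n : Nat} {k : String}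
    (hn : 1 ≤ n) (hl : k.toList.length = n) :
    List.count k (LA orders) = List.count k (LB orders n) := by
  unfold LA LB
  rw [List.count_flatMap, List.count_flatMap]
  congr 1
  exact List.map_congr_left (fun o _ => count_grpA hn hl)

-- the qualifying items ("len(od[0]) == num and od[1] >= 2") and their running maximum
def qualP (num : Int) (p : String × Int) : Bool := decide (PySem.Str.len p.1 = num ∧ 2 ≤ p.2)

def qlOf (num : Int) (l : List (String × Int)) : List (String × Int) := l.filter (qualP num)

def maxOf (num : Int) (l : List (String × Int)) : Int :=
  (qlOf num l).foldl (fun m p => max m p.2) 0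

theorem maxOf_eq_foldl_max (num : Int) (l : List (String × Int)) :
    maxOf num l = ((qlOf num l).map (fun p => p.2)).foldl max 0 := by
  rw [maxOf, List.foldl_map]

theorem le_maxOf {num : Int} {l : List (String × Int)} {p : String × Int}
    (hp : p ∈ qlOf num l) : p.2 ≤ maxOf num l := by
  rw [maxOf_eq_foldl_max]
  exact (PySem.List.le_foldl_max _ _).2 p.2 (List.mem_map.mpr ⟨p, hp, rfl⟩)

theorem two_le_of_mem_qlOf {num : Int} {l : List (String × Int)} {p : String × Int}
    (hp : p ∈ qlOf num l) : PySem.Str.len p.1 = num ∧ 2 ≤ p.2 := by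
  have := (List.mem_filter.mp hp).2
  simpa [qualP] using this

-- the A-side argmax-collect fold equals "filter the qualifying items at the running maximum"
theorem foldA_char (num : Int) (l : List (String × Int)) :
    l.foldl (courseStepA num) ([], 0) =
      ((qlOf num l).filter (fun p => p.2 == maxOf num l), maxOf num l) ∧
      (qlOf num l = [] ∨ ∃ p ∈ qlOf num l, p.2 = maxOf num l) := by
  induction l using List.reverseRecOn with
  | nil => simp [qlOf, maxOf]
  | append_singleton l p ih =>
    obtain ⟨ihf, ihw⟩ := ih
    by_cases hq : PySem.Str.len p.1 = num ∧ 2 ≤ p.2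
    · have hqb : qualP num p = true := by simpa [qualP] using hq
      have hql : qlOf num (l ++ [p]) = qlOf num l ++ [p] := by
        simp [qlOf, List.filter_append, hqb]
      have hmax : maxOf num (l ++ [p]) = max (maxOf num l) p.2 := by
        rw [maxOf, hql, List.foldl_append]
        rfl
      rw [List.foldl_append, List.foldl_cons, List.foldl_nil, ihf]
      by_cases hQ : qlOf num l = []
      · have hM : maxOf num l = 0 := by simp [maxOf, hQ]
        have hmax' : maxOf num (l ++ [p]) = p.2 := by rw [hmax, hM]; omega
        constructor
        · rw [courseStepA, if_pos hq]
          simp [hQ, hql, hmax']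
        · exact Or.inr ⟨p, by simp [hql], by rw [hmax']⟩
      · obtain ⟨p0, hp0, hp0M⟩ := ihw.resolve_left hQ
        have h2p0 : 2 ≤ p0.2 := (two_le_of_mem_qlOf hp0).2
        have hM2 : 2 ≤ maxOf num l := hp0M ▸ h2p0
        have hfilne : p0 ∈ (qlOf num l).filter (fun p => p.2 == maxOf num l) :=
          List.mem_filter.mpr ⟨hp0, by simp [hp0M]⟩
        have hlenne : ((qlOf num l).filter (fun p => p.2 == maxOf num l)).length ≠ 0 := by
          intro h
          rw [List.length_eq_zero_iff] at h
          simp [h] at hfilne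
        rw [courseStepA, if_pos hq]
        simp only [if_neg hlenne]
        by_cases hgt : p.2 > maxOf num l
        · have hmax' : maxOf num (l ++ [p]) = p.2 := by rw [hmax]; omega
          have hnil : (qlOf num l).filter (fun q => q.2 == p.2) = [] := by
            rw [List.filter_eq_nil_iff]
            intro q hqm
            have := le_maxOf hqm
            simp only [beq_iff_eq]
            omega
          constructor
          · rw [if_pos hgt]
            simp [hql, List.filter_append, hmax', hnil]
          · exact Or.inr ⟨p, by simp [hql], by rw [hmax']⟩
        · have hmax' : maxOf num (l ++ [p]) = maxOf num l := by rw [hmax]; omega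
          rw [if_neg hgt]
          by_cases heq : p.2 = maxOf num l
          · constructor
            · rw [if_pos heq]
              simp [hql, List.filter_append, hmax', heq]
            · exact Or.inr ⟨p0, by simp [hql, hp0], hmax' ▸ hp0M⟩
          · constructor
            · rw [if_neg heq]
              simp [hql, List.filter_append, hmax', heq]
            · exact Or.inr ⟨p0, by simp [hql, hp0], hmax' ▸ hp0M⟩
    · have hqb : qualP num p = false := by simpa [qualP] using hq
      have hql : qlOf num (l ++ [p]) = qlOf num l := by
        simp [qlOf, List.filter_append, hqb]
      have hmax : maxOf num (l ++ [p]) = maxOf num l := by rw [maxOf, hql]; rfl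
      rw [List.foldl_append, List.foldl_cons, List.foldl_nil, ihf, courseStepA, if_neg hq]
      rw [hql, hmax]
      exact ⟨rfl, ihw⟩

theorem foldl_max_le (xs : List Int) (B : Int) (a : Int) (ha : a ≤ B)
    (h : ∀ x ∈ xs, x ≤ B) : xs.foldl max a ≤ B := by
  induction xs generalizing a with
  | nil => simpa using ha
  | cons x t ih =>
    simp only [List.foldl_cons]
    exact ih (max a x) (max_le ha (h x (by simp))) (fun y hy => h y (by simp [hy]))

theorem keys_as_map (d : PySem.Dict String Int) : d.items.map (fun i => i.1) = d.keys := rfl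

theorem nodup_selA (l : List (String × Int)) (num M : Int) (h : (l.map (fun i => i.1)).Nodup) :
    (((qlOf num l).filter (fun p => p.2 == M)).map (fun i => i.1)).Nodup :=
  h.sublist (List.Sublist.map _ (List.filter_sublist.trans List.filter_sublist))

theorem nodup_selB (l : List (String × Int)) (best : Int) (h : (l.map (fun i => i.1)).Nodup) :
    ((l.filter (fun p => p.2 == best)).map (fun p => p.1)).Nodup :=
  h.sublist (List.Sublist.map _ List.filter_sublist)

theorem mem_selA_iff (orders : List String) (num M : Int) (x : String) :
    (x ∈ ((qlOf num (PySem.Dict.counter (LA orders)).items).filter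
        (fun p => p.2 == M)).map (fun i => i.1)) ↔
      (x ∈ LA orders ∧ (x.toList.length : Int) = num ∧
        2 ≤ (List.count x (LA orders) : Int) ∧ (List.count x (LA orders) : Int) = M) := by
  rw [List.mem_map]
  constructor
  · rintro ⟨p, hp, rfl⟩
    have hfil := List.mem_filter.mp hp
    have hqm := hfil.1
    have hql := List.mem_filter.mp hqm
    have hitems := hql.1
    rw [PySem.Dict.items_counter] at hitems
    obtain ⟨k, hk, hpk⟩ := List.mem_map.mp hitems
    have hq := two_le_of_mem_qlOf hqm
    rw [PySem.Str.len_eq] at hq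
    have hbeq : p.2 = M := by simpa using hfil.2
    rw [← hpk] at hq hbeq ⊢
    exact ⟨(PySem.Set.mem_ofList _ _).mp hk, hq.1, hq.2, hbeq⟩
  · rintro ⟨hmem, hlen, h2, hM⟩
    refine ⟨(x, (List.count x (LA orders) : Int)), List.mem_filter.mpr
      ⟨List.mem_filter.mpr ⟨?_, ?_⟩, ?_⟩, rfl⟩
    · rw [PySem.Dict.items_counter]
      exact List.mem_map.mpr ⟨x, (PySem.Set.mem_ofList _ _).mpr hmem, rfl⟩
    · simp only [qualP, PySem.Str.len_eq, decide_eq_true_eq]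
      exact ⟨hlen, h2⟩
    · simpa using hM

theorem mem_selB_iff (LBl : List String) (best : Int) (x : String) :
    x ∈ ((PySem.Dict.counter LBl).items.filter (fun p => p.2 == best)).map (fun p => p.1) ↔
      x ∈ LBl ∧ (List.count x LBl : Int) = best := by
  rw [List.mem_map]
  constructor
  · rintro ⟨p, hp, rfl⟩
    have hfil := List.mem_filter.mp hp
    have hitems := hfil.1
    rw [PySem.Dict.items_counter] at hitems
    obtain ⟨k, hk, hpk⟩ := List.mem_map.mp hitems
    have hbeq : p.2 = best := by simpa using hfil.2
    rw [← hpk] at hbeq ⊢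
    exact ⟨(PySem.Set.mem_ofList _ _).mp hk, hbeq⟩
  · rintro ⟨hmem, hbest⟩
    refine ⟨(x, (List.count x LBl : Int)), List.mem_filter.mpr ⟨?_, ?_⟩, rfl⟩
    · rw [PySem.Dict.items_counter]
      exact List.mem_map.mpr ⟨x, (PySem.Set.mem_ofList _ _).mpr hmem, rfl⟩
    · simpa using hbest

theorem valuesB_eq (LBl : List String) :
    (PySem.Dict.counter LBl).values =
      (PySem.Set.ofList LBl).map (fun k => (List.count k LBl : Int)) := by
  rw [PySem.Dict.values_eq_map_keys _ (PySem.Dict.nodup_keys_counter _) 0,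
    PySem.Dict.keys_counter]
  exact List.map_congr_left (fun k _ => PySem.Dict.getD_counter _ _)

theorem le_maxD_of_mem {xs : List Int} {v : Int} (hv : v ∈ xs) :
    v ≤ PySem.List.maxD xs (fun x => x) 0 := by
  cases hm : PySem.List.max? xs (fun x => x) with
  | none =>
    rw [(PySem.List.max?_eq_none_iff _ _).mp hm] at hv
    cases hv
  | some m =>
    have hb : PySem.List.maxD xs (fun x => x) 0 = m := by simp [PySem.List.maxD, hm]
    rw [hb]
    exact PySem.List.max?_isMax hm v hv

theorem mem_LA_le_longest {orders : List String} {k : String} (h : k ∈ LA orders) :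
    (k.toList.length : Int) ≤
      PySem.List.maxD (orders.map (fun o => PySem.Str.len o)) (fun v => v) 0 := by
  simp only [LA, List.mem_flatMap] at h
  obtain ⟨o, ho, hgo⟩ := h
  obtain ⟨f, hf, c, hc, rfl⟩ := mem_grpA_iff.mp hgo
  have h2 := ((PySem.List.mem_combinations_iff _ _ _).mp hc).1.length_le
  have h4 := le_maxD_of_mem (xs := orders.map (fun o => PySem.Str.len o))
    (v := PySem.Str.len o) (List.mem_map.mpr ⟨o, ho, rfl⟩)
  rw [PySem.Str.len_eq] at h4
  rw [len_joinS]
  omega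

-- per course entry, A's appended keys are a permutation of B's
theorem perNum_perm (orders : List String) (num : Int) :
    (((buildDictA orders).items.foldl (courseStepA num) ([], 0)).1.map (fun i => i.1)).Perm
      (pickB orders (PySem.List.maxD (orders.map (fun o => PySem.Str.len o)) (fun v => v) 0)
        num) := by
  rw [buildDictA_eq, (foldA_char num (PySem.Dict.counter (LA orders)).items).1]
  by_cases hnum : num < 1
  · have hql : qlOf num (PySem.Dict.counter (LA orders)).items = [] := by
      rw [qlOf, List.filter_eq_nil_iff]
      intro p hp
      have hk : p.1 ∈ LA orders := by
        have := PySem.Dict.mem_keys_of_mem_items _ hp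
        rw [PySem.Dict.keys_counter] at this
        exact (PySem.Set.mem_ofList _ _).mp this
      have h1 : 1 ≤ p.1.toList.length := one_le_len_of_mem_LA hk
      simp only [qualP, PySem.Str.len_eq, decide_eq_true_eq, not_and]
      intro hlen _
      omega
    rw [hql]
    simp [pickB, hnum]
  · rw [not_lt] at hnum
    have hcast : ((num.toNat : Nat) : Int) = num := Int.toNat_of_nonneg (by omega)
    have hn1 : 1 ≤ num.toNat := by omega
    by_cases hlong : PySem.List.maxD (orders.map (fun o => PySem.Str.len o)) (fun v => v) 0 < num
    · have hql : qlOf num (PySem.Dict.counter (LA orders)).items = [] := by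
        rw [qlOf, List.filter_eq_nil_iff]
        intro p hp
        have hk : p.1 ∈ LA orders := by
          have := PySem.Dict.mem_keys_of_mem_items _ hp
          rw [PySem.Dict.keys_counter] at this
          exact (PySem.Set.mem_ofList _ _).mp this
        have hle := mem_LA_le_longest hk
        simp only [qualP, PySem.Str.len_eq, decide_eq_true_eq, not_and]
        intro hlen _
        omega
      rw [hql]
      have hB : pickB orders
          (PySem.List.maxD (orders.map (fun o => PySem.Str.len o)) (fun v => v) 0) num = [] := by
        unfold pickB
        rw [if_pos (Or.inr hlong)]
      rw [hB]
      simp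
    · simp only [pickB, countCombosB_eq,
        if_neg (show ¬(num < 1 ∨ PySem.List.maxD (orders.map (fun o => PySem.Str.len o))
          (fun v => v) 0 < num) by omega)]
      have hub : ∀ k ∈ LB orders num.toNat, (List.count k (LB orders num.toNat) : Int) ≤
          PySem.List.maxD (PySem.Dict.counter (LB orders num.toNat)).values (fun v => v) 0 := by
        intro k hk
        refine le_maxD_of_mem ?_
        rw [valuesB_eq]
        exact List.mem_map.mpr ⟨k, (PySem.Set.mem_ofList _ _).mpr hk, rfl⟩
      have hbm : 2 ≤ PySem.List.maxD (PySem.Dict.counter (LB orders num.toNat)).values (fun v => v) 0 →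
          ∃ kb ∈ LB orders num.toNat, (List.count kb (LB orders num.toNat) : Int) =
            PySem.List.maxD (PySem.Dict.counter (LB orders num.toNat)).values (fun v => v) 0 := by
        intro h2
        cases hm : PySem.List.max? (PySem.Dict.counter (LB orders num.toNat)).values (fun v => v) with
        | none =>
          exfalso
          have hb : PySem.List.maxD (PySem.Dict.counter (LB orders num.toNat)).values (fun v => v) 0 = 0 := by
            simp [PySem.List.maxD, hm]
          omega
        | some m =>
          have hb : PySem.List.maxD (PySem.Dict.counter (LB orders num.toNat)).values (fun v => v) 0 = m := by
            simp [PySem.List.maxD, hm]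
          have hmm := PySem.List.max?_mem hm
          rw [valuesB_eq] at hmm
          obtain ⟨kb, hkb, hkbv⟩ := List.mem_map.mp hmm
          exact ⟨kb, (PySem.Set.mem_ofList _ _).mp hkb, by rw [hkbv, hb]⟩
      by_cases hbest : 2 ≤ PySem.List.maxD (PySem.Dict.counter (LB orders num.toNat)).values (fun v => v) 0
      · rw [if_pos hbest]
        -- the running maximum equals best
        have hcnt : ∀ k : String, (k.toList.length : Int) = num →
            List.count k (LA orders) = List.count k (LB orders num.toNat) := by
          intro k hk
          exact count_LA_eq_count_LB hn1 (by omega)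
        have hM : maxOf num (PySem.Dict.counter (LA orders)).items =
            PySem.List.maxD (PySem.Dict.counter (LB orders num.toNat)).values (fun v => v) 0 := by
          apply le_antisymm
          · rw [maxOf_eq_foldl_max]
            apply foldl_max_le _ _ _ (by omega)
            intro v hv
            obtain ⟨p, hp, rfl⟩ := List.mem_map.mp hv
            have hq := two_le_of_mem_qlOf hp
            rw [PySem.Str.len_eq] at hq
            have hpi := (List.mem_filter.mp hp).1
            rw [PySem.Dict.items_counter] at hpi
            obtain ⟨k, hk, hpk⟩ := List.mem_map.mp hpi
            rw [← hpk] at hq ⊢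
            simp only [Prod.fst, Prod.snd] at hq ⊢
            have hkLB : k ∈ LB orders num.toNat :=
              mem_LA_len_mem_LB ((PySem.Set.mem_ofList _ _).mp hk) (by have := hq.1; omega)
            rw [hcnt k hq.1]
            exact hub k hkLB
          · obtain ⟨kb, hkb, hkbv⟩ := hbm hbest
            have hkbA : kb ∈ LA orders := mem_LB_mem_LA hn1 hkb
            have hkbl : kb.toList.length = num.toNat := mem_LB_len hkb
            have hpair : (kb, (List.count kb (LA orders) : Int)) ∈
                qlOf num (PySem.Dict.counter (LA orders)).items := by
              apply List.mem_filter.mpr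
              constructor
              · rw [PySem.Dict.items_counter]
                exact List.mem_map.mpr ⟨kb, (PySem.Set.mem_ofList _ _).mpr hkbA, rfl⟩
              · simp only [qualP, PySem.Str.len_eq, decide_eq_true_eq]
                refine ⟨by omega, ?_⟩
                rw [hcnt kb (by omega), hkbv]
                omega
            have := le_maxOf hpair
            simp only at this
            rw [hcnt kb (by omega), hkbv] at this
            exact this
        rw [hM]
        apply (List.perm_ext_iff_of_nodup ?_ ?_).mpr
        · intro x
          rw [mem_selA_iff, mem_selB_iff]
          constructor
          · rintro ⟨hxA, hxlen, hx2, hxM⟩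
            have hxLB : x ∈ LB orders num.toNat := mem_LA_len_mem_LB hxA (by omega)
            exact ⟨hxLB, by rw [← hcnt x hxlen]; exact hxM⟩
          · rintro ⟨hxLB, hxbest⟩
            have hxlen : x.toList.length = num.toNat := mem_LB_len hxLB
            have hxA : x ∈ LA orders := mem_LB_mem_LA hn1 hxLB
            have hc := hcnt x (by omega)
            exact ⟨hxA, by omega, by rw [hc, hxbest]; omega, by rw [hc, hxbest]⟩
        · exact nodup_selA _ _ _ (by rw [keys_as_map]; exact PySem.Dict.nodup_keys_counter _)
        · exact nodup_selB _ _ (by rw [keys_as_map]; exact PySem.Dict.nodup_keys_counter _)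
      · rw [if_neg hbest]
        have hql : qlOf num (PySem.Dict.counter (LA orders)).items = [] := by
          rw [qlOf, List.filter_eq_nil_iff]
          intro p hp
          rw [PySem.Dict.items_counter] at hp
          obtain ⟨k, hk, hpk⟩ := List.mem_map.mp hp
          rw [← hpk]
          simp only [qualP, PySem.Str.len_eq, decide_eq_true_eq, not_and]
          intro hlen
          have hkLB : k ∈ LB orders num.toNat :=
            mem_LA_len_mem_LB ((PySem.Set.mem_ofList _ _).mp hk) (by omega)
          have h1 := hub k hkLB
          have h2 : List.count k (LA orders) = List.count k (LB orders num.toNat) :=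
            count_LA_eq_count_LB hn1 (by omega)
          omega
        rw [hql]
        simp

theorem foldl_append_perm (f g : Int → List String) (h : ∀ num, (f num).Perm (g num)) :
    ∀ (course : List Int) (a b : List String), a.Perm b →
      (course.foldl (fun x num => x ++ f num) a).Perm
        (course.foldl (fun x num => x ++ g num) b) := by
  intro course
  induction course with
  | nil => intro a b hab; simpa using hab
  | cons n t ih =>
    intro a b hab
    simp only [List.foldl_cons]
    exact ih _ _ (hab.append (h n))

theorem memoB_fold (orders : List String) (longest : Int) :
    ∀ (course : List Int) (a : List String) (d : PySem.Dict Int (List String)),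
      (∀ k, d.contains k = true → d.getD k [] = pickB orders longest k) →
      (course.foldl (stepB orders longest) (a, d)).1 =
        course.foldl (fun x num => x ++ pickB orders longest num) a := by
  intro course
  induction course with
  | nil => intro a d _; rfl
  | cons n t ih =>
    intro a d hd
    simp only [List.foldl_cons, stepB]
    by_cases h : d.contains n = false
    · rw [if_pos h]
      rw [PySem.Dict.getD_insert_self]
      apply ih
      intro k hk
      by_cases hkn : k = n
      · subst hkn
        rw [PySem.Dict.getD_insert_self]
      · rw [PySem.Dict.getD_insert_of_ne _ _ _ hkn]
        apply hd
        rw [PySem.Dict.contains_insert] at hk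
        simpa [hkn] using hk
    · rw [if_neg h]
      rw [hd n (by revert h; cases d.contains n <;> simp)]
      exact ih _ _ hd

theorem solution_spec' (orders : List String) (course : List Int) :
    solution orders course = solution_alt orders course := by
  simp only [solution, solution_alt]
  rw [memoB_fold orders (PySem.List.maxD (orders.map (fun o => PySem.Str.len o)) (fun v => v) 0)
    course [] PySem.Dict.empty
    (fun k hk => by rw [PySem.Dict.contains_empty] at hk; cases hk)]
  exact PySem.List.sorted_eq_sorted_of_perm _ _ _ (fun a b h => h)
    (foldl_append_perm
      (fun num => ((buildDictA orders).items.foldl (courseStepA num) ([], 0)).1.map (fun i => i.1))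
      (pickB orders (PySem.List.maxD (orders.map (fun o => PySem.Str.len o)) (fun v => v) 0))
      (perNum_perm orders) course [] [] (List.Perm.refl []))

-- ===== VERDICT (by name: the statement is the Claim_ definition above) =====
theorem solution_spec : Claim_equal_solution := by
  intro orders course _
  unfold Spec_solution
  exact solution_spec' orders course
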